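-- pv_equiv track=rewrite | github.com/initflow/moysklad-orcar-synchronizer | synchronizer/utils/filter_util.py | filter_ids_list
-- ===== SOURCE A (Python) =====
-- def filter_ids_list(sync_ids, param_name, limit=100):
--     filter_list = []
--     counter = 0
--     filter_param = ''
--     for sync_id in sync_ids:
--         filter_param += param_name + '=' + sync_id[0] + ';'
--         counter += 1
--         if counter >= limit:
--             filter_list.append(filter_param)
--             filter_param = ''
--             counter = 0
--
--     if filter_param != '':
--         filter_list.append(filter_param)
--
--     return filter_list
-- ===== SOURCE B (Python) =====
-- def filter_ids_list(sync_ids, param_name, limit=100):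
--     # Chunk-wise: slice the list into chunks and join each chunk's filter
--     # parameters, instead of a flat loop with a manual counter/reset.
--     # Chunk size is at least 1 (A flushes after every element when limit <= 0).
--     size = limit if limit >= 1 else 1
--     filter_list = []
--     i = 0
--     while i < len(sync_ids):
--         filter_list.append(''.join(param_name + '=' + s[0] + ';' for s in sync_ids[i:i + size]))
--         i += size
--     return filter_list
-- ===== Notes on version B (the rewrite author's own statement) =====
-- stated objective: simpler
-- what changed: Replaces the flat loop with a manual counter/reset and running '+=' accumulation by slicing the list into chunks and joining each chunk's parameters.
import Mathlib
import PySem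

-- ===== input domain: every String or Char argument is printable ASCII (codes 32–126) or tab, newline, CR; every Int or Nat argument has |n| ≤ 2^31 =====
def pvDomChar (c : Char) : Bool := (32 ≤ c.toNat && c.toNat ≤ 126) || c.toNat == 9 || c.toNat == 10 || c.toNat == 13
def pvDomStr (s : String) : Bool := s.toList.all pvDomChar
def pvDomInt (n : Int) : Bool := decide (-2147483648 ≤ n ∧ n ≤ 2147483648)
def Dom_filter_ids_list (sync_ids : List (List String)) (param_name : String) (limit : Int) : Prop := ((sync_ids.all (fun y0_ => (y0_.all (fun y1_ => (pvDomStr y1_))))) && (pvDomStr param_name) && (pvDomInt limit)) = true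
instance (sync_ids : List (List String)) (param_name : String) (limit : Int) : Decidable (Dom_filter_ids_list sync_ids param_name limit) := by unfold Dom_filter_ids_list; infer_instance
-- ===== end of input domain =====

-- B replaces A's flat loop with manual counter/reset and running '+=' accumulation
-- by slicing the input into chunks and joining each chunk's parameters (objective: simpler).


-- ===== PORT A =====
-- sync_id[0] → PySem.List.pyGet?; '.getD ""' only fills the IndexError case, which Pre_ excludes.
def filter_ids_list (sync_ids : List (List String)) (param_name : String) (limit : Int) : List String :=
  let st := sync_ids.foldl
    (fun (st : List String × Int × String) sync_id =>
      let fp := st.2.2 ++ (param_name ++ "=" ++ ((PySem.List.pyGet? sync_id 0).getD "") ++ ";")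
      let c := st.2.1 + 1
      if limit ≤ c then (st.1 ++ [fp], (0 : Int), "") else (st.1, c, fp))
    ([], 0, "")
  if st.2.2 ≠ "" then st.1 ++ [st.2.2] else st.1

-- ===== PORT B =====
-- ''.join(param_name + '=' + s[0] + ';' for s in chunk), as a recursive concatenation
def pvRender (param_name : String) : List (List String) → String
  | [] => ""
  | s :: rest => (param_name ++ "=" ++ ((PySem.List.pyGet? s 0).getD "") ++ ";") ++ pvRender param_name rest

-- the 'while i < len(sync_ids)' loop; sync_ids[i:i+size] → PySem.List.slice;
-- 'hs : 1 ≤ size' is the loop's termination fact (B's size is always ≥ 1)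
def pvLoop (sync_ids : List (List String)) (param_name : String) (size : Int) (hs : 1 ≤ size) (i : Int) : List String :=
  if _h : i < (sync_ids.length : Int) then
    pvRender param_name (PySem.List.slice sync_ids (some i) (some (i + size))) ::
      pvLoop sync_ids param_name size hs (i + size)
  else []
  termination_by ((sync_ids.length : Int) - i).toNat
  decreasing_by omega

-- size = limit if limit >= 1 else 1, as a dependent if so the loop carries 1 ≤ size
def filter_ids_list_alt (sync_ids : List (List String)) (param_name : String) (limit : Int) : List String :=
  if h : 1 ≤ limit then pvLoop sync_ids param_name limit h 0
  else pvLoop sync_ids param_name 1 le_rfl 0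

-- ===== PRECONDITION & SPEC =====
-- Pre_ excludes inputs with an empty inner list, on which A (and B) raise IndexError at sync_id[0].
def Pre_filter_ids_list (sync_ids : List (List String)) (param_name : String) (limit : Int) : Prop :=
  ∀ sid ∈ sync_ids, sid ≠ []
instance (sync_ids : List (List String)) (param_name : String) (limit : Int) : Decidable (Pre_filter_ids_list sync_ids param_name limit) := by unfold Pre_filter_ids_list; infer_instance
def pvWitness_filter_ids_list : List (List String) × String × Int := ([["a"], ["b"], ["c"]], "id", 2)

def Spec_filter_ids_list (sync_ids : List (List String)) (param_name : String) (limit : Int) (out : List String) : Prop := out = filter_ids_list_alt sync_ids param_name limit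
instance (sync_ids : List (List String)) (param_name : String) (limit : Int) (out : List String) : Decidable (Spec_filter_ids_list sync_ids param_name limit out) := by unfold Spec_filter_ids_list; infer_instance

-- ===== CLAIM (what is proved, stated in full; the proofs are below) =====
def Claim_equal_filter_ids_list : Prop := ∀ (sync_ids : List (List String)) (param_name : String) (limit : Int), Dom_filter_ids_list sync_ids param_name limit → Pre_filter_ids_list sync_ids param_name limit → Spec_filter_ids_list sync_ids param_name limit (filter_ids_list sync_ids param_name limit)

-- ===== LEMMAS AND PROOFS =====

-- abbreviations used only by the proofs
def pvItem (param_name : String) (s : List String) : String :=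
  param_name ++ "=" ++ ((PySem.List.pyGet? s 0).getD "") ++ ";"

def pvStep (param_name : String) (limit : Int) (st : List String × Int × String) (sync_id : List String) : List String × Int × String :=
  let fp := st.2.2 ++ (param_name ++ "=" ++ ((PySem.List.pyGet? sync_id 0).getD "") ++ ";")
  let c := st.2.1 + 1
  if limit ≤ c then (st.1 ++ [fp], (0 : Int), "") else (st.1, c, fp)

def pvFinish (st : List String × Int × String) : List String :=
  if st.2.2 ≠ "" then st.1 ++ [st.2.2] else st.1

theorem pvStep_eq (pn : String) (limit : Int) (st : List String × Int × String) (x : List String) :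
    pvStep pn limit st x =
      if limit ≤ st.2.1 + 1 then (st.1 ++ [st.2.2 ++ pvItem pn x], 0, "")
      else (st.1, st.2.1 + 1, st.2.2 ++ pvItem pn x) := rfl

theorem pvFinish_of_ne (l : List String) (c : Int) (fp : String) (h : fp ≠ "") :
    pvFinish (l, c, fp) = l ++ [fp] := by simp [pvFinish, h]

theorem pvFinish_empty (l : List String) (c : Int) :
    pvFinish (l, c, "") = l := by simp [pvFinish]

def pvChunks (param_name : String) (size : Nat) : List (List String) → List String
  | [] => []
  | x :: xs => pvRender param_name (x :: xs.take (size - 1)) :: pvChunks param_name size (xs.drop (size - 1))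
  termination_by l => l.length
  decreasing_by simp

theorem pvChunks_nil (pn : String) (k : Nat) : pvChunks pn k [] = [] := by
  rw [pvChunks]

theorem pvChunks_cons (pn : String) (k : Nat) (x : List String) (xs : List (List String)) :
    pvChunks pn k (x :: xs) =
      pvRender pn (x :: xs.take (k - 1)) :: pvChunks pn k (xs.drop (k - 1)) := by
  rw [pvChunks]

theorem pvRender_cons (pn : String) (s : List String) (l : List (List String)) :
    pvRender pn (s :: l) = pvItem pn s ++ pvRender pn l := rfl

theorem pvRender_ne_empty (pn : String) (s : List String) (l : List (List String)) :
    pvRender pn (s :: l) ≠ "" := by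
  intro h
  have : (pvRender pn (s :: l)).length = 0 := by rw [h]; rfl
  rw [pvRender_cons, String.length_append, pvItem, String.length_append, String.length_append,
    String.length_append] at this
  simp at this

theorem filter_ids_list_eq_finish (sync_ids : List (List String)) (pn : String) (limit : Int) :
    filter_ids_list sync_ids pn limit =
      pvFinish (sync_ids.foldl (pvStep pn limit) ([], 0, "")) := rfl


-- B's index loop visits exactly the successive chunks
theorem pvLoop_eq_chunks (pn : String) (size : Int) (hs : 1 ≤ size) (l : List (List String)) :
    ∀ (n : Nat) (i : Int), 0 ≤ i → l.length ≤ i.toNat + n →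
      pvLoop l pn size hs i = pvChunks pn size.toNat (l.drop i.toNat) := by
  intro n
  induction n with
  | zero =>
    intro i hi h
    rw [pvLoop, dif_neg (by omega : ¬ i < (l.length : Int))]
    rw [List.drop_eq_nil_of_le (by omega), pvChunks_nil]
  | succ n ih =>
    intro i hi h
    rw [pvLoop]
    by_cases hlt : i < (l.length : Int)
    · rw [dif_pos hlt]
      obtain ⟨m, hm⟩ : ∃ m, size.toNat = m + 1 := ⟨size.toNat - 1, by omega⟩
      have hd : ∃ x xs, l.drop i.toNat = x :: xs := by
        cases hcase : l.drop i.toNat with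
        | nil => exfalso; have := congrArg List.length hcase; simp at this; omega
        | cons x xs => exact ⟨x, xs, rfl⟩
      obtain ⟨x, xs, hd⟩ := hd
      have hslice : PySem.List.slice l (some i) (some (i + size)) = x :: xs.take m := by
        rw [PySem.List.slice_toNat l hi (by omega)]
        have : (i + size).toNat - i.toNat = m + 1 := by omega
        rw [this, hd, List.take_succ_cons]
      have hdrop : l.drop (i + size).toNat = xs.drop m := by
        have h1 : (i + size).toNat = i.toNat + (m + 1) := by omega
        rw [h1, ← List.drop_drop, hd, List.drop_succ_cons]
      rw [hslice, ih (i + size) (by omega) (by omega), hdrop, hd, pvChunks_cons, hm]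
      simp
    · rw [dif_neg hlt]
      rw [List.drop_eq_nil_of_le (by omega), pvChunks_nil]

-- no flush happens while the counter stays below the limit
theorem pvFold_no_flush (pn : String) (limit : Int) :
    ∀ (l : List (List String)) (acc : List String) (c : Int) (fp : String),
      c + l.length < limit →
      l.foldl (pvStep pn limit) (acc, c, fp) = (acc, c + l.length, fp ++ pvRender pn l) := by
  intro l
  induction l with
  | nil => intro acc c fp _; simp [pvRender]
  | cons x xs ih =>
    intro acc c fp h
    have hx : ¬ limit ≤ c + 1 := by simp at h; omega
    rw [List.foldl_cons, pvStep_eq, if_neg hx]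
    rw [ih _ (c + 1) _ (by simp at h ⊢; omega)]
    simp [pvRender_cons, String.append_assoc, Prod.ext_iff]
    omega

-- the run flushes exactly at its last element, where the counter reaches the limit
theorem pvFold_flush (pn : String) (limit : Int) :
    ∀ (l : List (List String)) (acc : List String) (c : Int) (fp : String),
      l ≠ [] → c + l.length = limit →
      l.foldl (pvStep pn limit) (acc, c, fp) = (acc ++ [fp ++ pvRender pn l], 0, "") := by
  intro l
  induction l with
  | nil => intro _ _ _ h; exact absurd rfl h
  | cons x xs ih =>
    intro acc c fp _ h
    cases xs with
    | nil =>
      have hx : limit ≤ c + 1 := by simp at h; omega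
      rw [List.foldl_cons, pvStep_eq, if_pos hx, List.foldl_nil]
      simp [pvRender, pvItem, String.append_empty]
    | cons y ys =>
      have hx : ¬ limit ≤ c + 1 := by simp at h; omega
      rw [List.foldl_cons, pvStep_eq, if_neg hx]
      rw [ih _ (c + 1) _ (by simp) (by simp at h ⊢; omega)]
      simp [pvRender_cons, String.append_assoc]

-- limit ≤ 0: A flushes after every element
theorem pvFold_all_flush (pn : String) (limit : Int) (hl : limit ≤ 0) :
    ∀ (l : List (List String)) (acc : List String),
      l.foldl (pvStep pn limit) (acc, 0, "") = (acc ++ l.map (pvItem pn), 0, "") := by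
  intro l
  induction l with
  | nil => intro acc; simp
  | cons x xs ih =>
    intro acc
    have hx : limit ≤ (0 : Int) + 1 := by omega
    rw [List.foldl_cons, pvStep_eq, if_pos hx, ih]
    simp [String.empty_append]

theorem pvChunks_one (pn : String) :
    ∀ (l : List (List String)), pvChunks pn 1 l = l.map (pvItem pn) := by
  intro l
  induction l with
  | nil => rw [pvChunks_nil]; rfl
  | cons x xs ih =>
    rw [pvChunks_cons]
    simp only [Nat.sub_self, List.take_zero, List.drop_zero, ih, List.map_cons]
    rw [pvRender_cons]
    simp [pvRender, String.append_empty]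

theorem pvMain (pn : String) (limit : Int) (hl : 1 ≤ limit) :
    ∀ (n : Nat) (l : List (List String)) (acc : List String), l.length ≤ n →
      pvFinish (l.foldl (pvStep pn limit) (acc, 0, "")) =
        acc ++ pvChunks pn limit.toNat l := by
  intro n
  induction n with
  | zero =>
    intro l acc h
    have hnil : l = [] := by cases l <;> simp_all
    subst hnil
    simp [pvFinish_empty, pvChunks_nil]
  | succ n ih =>
    intro l acc h
    cases l with
    | nil => simp [pvFinish_empty, pvChunks_nil]
    | cons x xs =>
      by_cases hc : ((x :: xs).length : Int) < limit
      · -- the whole list fits in one (final, unflushed) chunk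
        rw [pvFold_no_flush pn limit (x :: xs) acc 0 "" (by omega)]
        rw [String.empty_append, pvFinish_of_ne _ _ _ (pvRender_ne_empty pn x xs)]
        have hc' : ((xs.length : Int)) + 1 < limit := by simpa using hc
        have htake : xs.take (limit.toNat - 1) = xs :=
          List.take_of_length_le (by omega)
        have hdrop : xs.drop (limit.toNat - 1) = ([] : List (List String)) :=
          List.drop_eq_nil_of_le (by omega)
        rw [pvChunks_cons, htake, hdrop, pvChunks_nil]
      · -- the first limit.toNat elements flush; recurse on the rest
        have hc' : limit ≤ (xs.length : Int) + 1 := by simpa using not_lt.mp hc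
        have hsplit : x :: xs = (x :: xs.take (limit.toNat - 1)) ++ xs.drop (limit.toNat - 1) := by
          simp [List.take_append_drop]
        conv_lhs => rw [hsplit, List.foldl_append]
        rw [pvFold_flush pn limit _ acc 0 "" (by simp)
          (by simp [List.length_take]; omega)]
        rw [String.empty_append]
        rw [ih (xs.drop (limit.toNat - 1)) (acc ++ [pvRender pn (x :: xs.take (limit.toNat - 1))])
          (by simp at h ⊢; omega)]
        rw [pvChunks_cons]
        simp

-- ===== VERDICT (by name: the statement is the Claim_ definition above) =====
theorem filter_ids_list_spec : Claim_equal_filter_ids_list := by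
  intro sync_ids pn limit _ _
  unfold Spec_filter_ids_list filter_ids_list_alt
  rw [filter_ids_list_eq_finish]
  by_cases hl : 1 ≤ limit
  · rw [dif_pos hl,
      pvLoop_eq_chunks pn limit hl sync_ids sync_ids.length 0 le_rfl (by simp)]
    simp only [Int.toNat_zero, List.drop_zero]
    exact pvMain pn limit hl sync_ids.length sync_ids [] le_rfl
  · rw [dif_neg hl,
      pvLoop_eq_chunks pn 1 le_rfl sync_ids sync_ids.length 0 le_rfl (by simp)]
    simp only [Int.toNat_zero, List.drop_zero, Int.toNat_one]
    rw [pvFold_all_flush pn limit (by omega) sync_ids [], pvFinish_empty]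
    simp [pvChunks_one]
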